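-- pv_equiv track=rewrite | github.com/johnwasham/python-solutions | solutions/notes/sliding_window.py | longest_dup_subarray
-- ===== SOURCE A (Python) =====
-- def longest_dup_subarray(nums):
--     max_len = 0
--     L = 0
--
--     for R in range(len(nums)):
--         if nums[L] != nums[R]:
--             L = R
--         max_len = max(max_len, R - L + 1)
--
--     return max_len
-- ===== SOURCE B (Python) =====
-- def longest_dup_subarray(nums):
--     if not nums:
--         return 0
--     runs = []
--     n = 1
--     for a, b in zip(nums, nums[1:]):
--         if a == b:
--             n += 1
--         else:
--             runs.append(n)
--             n = 1
--     runs.append(n)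
--     return max(runs)
-- ===== Notes on version B (the rewrite author's own statement) =====
-- stated objective: alternative
-- what changed: Replaces the L/R index sliding-window scan with a group-then-reduce structure: first build the list of maximal run lengths by comparing adjacent pairs, then return the maximum of that list.
import Mathlib
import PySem

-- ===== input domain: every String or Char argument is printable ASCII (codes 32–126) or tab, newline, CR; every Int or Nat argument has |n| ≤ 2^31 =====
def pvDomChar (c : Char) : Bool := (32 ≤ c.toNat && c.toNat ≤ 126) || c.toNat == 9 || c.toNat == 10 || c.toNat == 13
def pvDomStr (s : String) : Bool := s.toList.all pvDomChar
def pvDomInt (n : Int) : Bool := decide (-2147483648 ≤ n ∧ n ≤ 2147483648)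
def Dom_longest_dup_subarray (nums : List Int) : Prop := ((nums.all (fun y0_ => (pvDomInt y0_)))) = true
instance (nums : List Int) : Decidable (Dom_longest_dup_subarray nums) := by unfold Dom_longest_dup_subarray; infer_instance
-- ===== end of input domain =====

-- B replaces A's L/R index sliding-window scan by a group-then-reduce pass (list of run lengths, then max); alternative structure, same cost.

-- ===== PORT A =====
-- loop body of A: state (max_len, L), iteration variable R
def pvStepA (nums : List Int) (st : Int × Int) (R : Int) : Int × Int :=
  let L := if PySem.List.pyGetD nums st.2 0 ≠ PySem.List.pyGetD nums R 0 then R else st.2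
  (max st.1 (R - L + 1), L)

def longest_dup_subarray (nums : List Int) : Int :=
  ((PySem.List.pyRange 0 (nums.length : Int) 1).foldl (pvStepA nums) (0, 0)).1

-- ===== PORT B =====
-- loop body of B: state (runs, n), iterating over adjacent pairs (a, b)
def pvStepB (st : List Int × Int) (ab : Int × Int) : List Int × Int :=
  if ab.1 = ab.2 then (st.1, st.2 + 1) else (st.1 ++ [st.2], 1)

def longest_dup_subarray_alt (nums : List Int) : Int :=
  match nums with
  | [] => 0
  | x :: xs =>
    let s := (List.zip (x :: xs) xs).foldl pvStepB ([], 1)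
    match s.1 ++ [s.2] with
    | [] => 0   -- unreachable (the matched list ends with s.2); total-ization only
    | h :: t => t.foldl max h

-- ===== PRECONDITION & SPEC =====
def Spec_longest_dup_subarray (nums : List Int) (out : Int) : Prop := out = longest_dup_subarray_alt nums
instance (nums : List Int) (out : Int) : Decidable (Spec_longest_dup_subarray nums out) := by unfold Spec_longest_dup_subarray; infer_instance

-- ===== CLAIM (what is proved, stated in full; the proofs are below) =====
def Claim_equal_longest_dup_subarray : Prop := ∀ (nums : List Int), Dom_longest_dup_subarray nums → Spec_longest_dup_subarray nums (longest_dup_subarray nums)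

-- ===== LEMMAS AND PROOFS =====

-- Python max(l) for nonempty l; 0 on [] (unreachable in use)
def pvFm : List Int → Int
  | [] => 0
  | h :: t => t.foldl max h

-- common normal form: v = value of the current run, m = max so far (incl. current run), cur = current run length
def pvGo (v m cur : Int) : List Int → Int
  | [] => m
  | y :: ys => if y ≠ v then pvGo y (max m 1) 1 ys else pvGo v (max m (cur + 1)) (cur + 1) ys

theorem pvFm_append (l : List Int) (a : Int) (h : l ≠ []) : pvFm (l ++ [a]) = max (pvFm l) a := by
  cases l with
  | nil => exact absurd rfl h
  | cons x t => simp [pvFm, List.foldl_append]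

theorem pvLemA (nums : List Int) : ∀ (ys : List Int) (k : Nat) (L m : Int),
    0 ≤ L → L ≤ (k : Int) → nums.drop k = ys → k ≤ nums.length →
    ((PySem.List.pyRange (k : Int) (nums.length : Int) 1).foldl (pvStepA nums) (m, L)).1
    = pvGo (PySem.List.pyGetD nums L 0) m ((k : Int) - L) ys := by
  intro ys
  induction ys with
  | nil =>
    intro k L m _ _ hdrop hk
    have hk' : k = nums.length := by
      have := List.length_drop (l := nums) (i := k)
      rw [hdrop] at this; simp at this; omega
    subst hk'
    rw [PySem.List.pyRange_one_eq_nil (by omega)]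
    simp [pvGo]
  | cons y ys' ih =>
    intro k L m hL0 hLk hdrop hk
    have hklt : k < nums.length := by
      by_contra h
      rw [List.drop_eq_nil_of_le (by omega)] at hdrop
      exact List.cons_ne_nil y ys' hdrop.symm
    have hget : nums[k]? = some y := by
      have h0 : (nums.drop k)[0]? = some y := by rw [hdrop]; rfl
      rw [List.getElem?_drop] at h0
      simpa using h0
    have hgetD : PySem.List.pyGetD nums ((k : Nat) : Int) 0 = y := by
      rw [PySem.List.pyGetD_natCast]
      simp [List.getD, hget]
    have hdrop' : nums.drop (k + 1) = ys' := by
      rw [(List.drop_drop ..).symm, hdrop]; rfl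
    rw [PySem.List.pyRange_one_cons (by exact_mod_cast hklt), List.foldl_cons]
    have hcast : ((k : Int) + 1) = (((k + 1 : Nat)) : Int) := by push_cast; ring
    by_cases hne : PySem.List.pyGetD nums L 0 = y
    · -- equal: L unchanged
      have hstep : pvStepA nums (m, L) ((k : Nat) : Int) = (max m ((k : Int) - L + 1), L) := by
        simp [pvStepA, hgetD, hne]
      rw [hstep, hcast]
      rw [ih (k + 1) L (max m ((k : Int) - L + 1)) hL0 (by push_cast; omega) hdrop' (by omega)]
      have h2 : (((k + 1 : Nat)) : Int) - L = ((k : Int) - L) + 1 := by push_cast; ring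
      rw [h2]
      simp [pvGo, hne]
    · -- different: L := R = k
      have hstep : pvStepA nums (m, L) ((k : Nat) : Int) = (max m 1, ((k : Nat) : Int)) := by
        simp [pvStepA, hgetD, hne]
      rw [hstep, hcast]
      rw [ih (k + 1) ((k : Nat) : Int) (max m 1) (by positivity) (by push_cast; omega) hdrop' (by omega)]
      have h2 : (((k + 1 : Nat)) : Int) - ((k : Nat) : Int) = 1 := by push_cast; ring
      rw [h2, hgetD]
      have hne' : y ≠ PySem.List.pyGetD nums L 0 := fun e => hne e.symm
      simp [pvGo, hne']

theorem pvA_eq_go (nums : List Int) :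
    longest_dup_subarray nums = (match nums with
      | [] => 0
      | x :: xs => pvGo x 1 1 xs) := by
  match nums with
  | [] =>
    simp [longest_dup_subarray, PySem.List.pyRange_one_eq_nil]
  | x :: xs =>
    unfold longest_dup_subarray
    have h := pvLemA (x :: xs) (x :: xs) 0 0 0 le_rfl le_rfl (by simp) (by simp)
    simp only [Nat.cast_zero] at h
    rw [h]
    have hx : PySem.List.pyGetD (x :: xs) 0 0 = x := PySem.List.pyGetD_zero_cons ..
    rw [hx]
    simp [pvGo]

theorem pvLemB : ∀ (xs : List Int) (prev : Int) (runs : List Int) (n : Int),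
    (let s := (List.zip (prev :: xs) xs).foldl pvStepB (runs, n)
     pvFm (s.1 ++ [s.2])) = pvGo prev (pvFm (runs ++ [n])) n xs := by
  intro xs
  induction xs with
  | nil => intro prev runs n; simp [pvGo]
  | cons y ys ih =>
    intro prev runs n
    simp only [List.zip_cons_cons, List.foldl_cons]
    by_cases h : prev = y
    · have hstep : pvStepB (runs, n) (prev, y) = (runs, n + 1) := by simp [pvStepB, h]
      rw [hstep]
      have hih := ih y runs (n + 1)
      simp only at hih ⊢
      rw [hih]
      have hmx : pvFm (runs ++ [n + 1]) = max (pvFm (runs ++ [n])) (n + 1) := by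
        cases runs with
        | nil => simp [pvFm]
        | cons r rs =>
          rw [pvFm_append _ _ (by simp), pvFm_append _ _ (by simp)]
          rw [max_assoc]
          congr 1
          omega
      rw [hmx]
      simp [pvGo, h]
    · have hstep : pvStepB (runs, n) (prev, y) = (runs ++ [n], 1) := by simp [pvStepB, h]
      rw [hstep]
      have hih := ih y (runs ++ [n]) 1
      simp only at hih ⊢
      rw [hih]
      rw [pvFm_append (runs ++ [n]) 1 (by simp)]
      have hne : y ≠ prev := fun e => h e.symm
      simp [pvGo, hne]

theorem pvB_eq_go (nums : List Int) :
    longest_dup_subarray_alt nums = (match nums with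
      | [] => 0
      | x :: xs => pvGo x 1 1 xs) := by
  match nums with
  | [] => rfl
  | x :: xs =>
    unfold longest_dup_subarray_alt
    have h := pvLemB xs x [] 1
    simp only at h
    have hfm : ∀ (s : List Int × Int),
        (match s.1 ++ [s.2] with
         | [] => (0 : Int)
         | h :: t => t.foldl max h) = pvFm (s.1 ++ [s.2]) := by
      intro s
      cases hs : s.1 ++ [s.2] with
      | nil => exact absurd hs (by simp)
      | cons hh tt => simp [pvFm]
    simp only [hfm]
    rw [h]
    simp [pvFm]

-- ===== VERDICT (by name: the statement is the Claim_ definition above) =====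
theorem longest_dup_subarray_spec : Claim_equal_longest_dup_subarray := by
  intro nums _
  unfold Spec_longest_dup_subarray
  rw [pvA_eq_go, pvB_eq_go]
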